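-- pv_equiv track=rewrite | github.com/pavansaipendry/BabyJay | app/rag/campus_retriever.py | format_tuition_context
-- ===== SOURCE A (Python) =====
-- from typing import List, Dict, Any, Optional
--
-- def format_tuition_context(fees: List[Dict]) -> str:
--     """Format tuition results for LLM context."""
--     if not fees:
--         return ""
--
--     lines = ["=== TUITION & FEES INFORMATION ==="]
--     current_category = None
--
--     for fee in fees:
--         cat = fee.get('category', 'General')
--         if cat != current_category:
--             lines.append(f"\n[{cat}]")
--             current_category = cat
--         lines.append(f"  {fee.get('item', 'N/A')}: {fee.get('value', 'N/A')}")
--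
--     return "\n".join(lines)
-- ===== SOURCE B (Python) =====
-- def _group_consecutive(fees):
--     """Recursively group consecutive fees sharing the same category."""
--     if not fees:
--         return []
--     head, rest = fees[0], fees[1:]
--     cat = head.get('category', 'General')
--     groups = _group_consecutive(rest)
--     if groups and groups[0][0] == cat:
--         return [(cat, [head] + groups[0][1])] + groups[1:]
--     return [(cat, [head])] + groups
--
--
-- def format_tuition_context(fees):
--     """Format tuition results for LLM context (group-first decomposition)."""
--     if not fees:
--         return ""
--     parts = ["=== TUITION & FEES INFORMATION ==="]
--     for cat, grp in _group_consecutive(fees):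
--         parts.append(f"\n[{cat}]")
--         for fee in grp:
--             parts.append(f"  {fee.get('item', 'N/A')}: {fee.get('value', 'N/A')}")
--     return "\n".join(parts)
-- ===== Notes on version B (the rewrite author's own statement) =====
-- stated objective: alternative
-- what changed: Replaces the flat loop with mutable current_category state by a two-phase decomposition: a recursive pass groups consecutive fees by category, then a nested render loop emits one header per group followed by its items.
import Mathlib
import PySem

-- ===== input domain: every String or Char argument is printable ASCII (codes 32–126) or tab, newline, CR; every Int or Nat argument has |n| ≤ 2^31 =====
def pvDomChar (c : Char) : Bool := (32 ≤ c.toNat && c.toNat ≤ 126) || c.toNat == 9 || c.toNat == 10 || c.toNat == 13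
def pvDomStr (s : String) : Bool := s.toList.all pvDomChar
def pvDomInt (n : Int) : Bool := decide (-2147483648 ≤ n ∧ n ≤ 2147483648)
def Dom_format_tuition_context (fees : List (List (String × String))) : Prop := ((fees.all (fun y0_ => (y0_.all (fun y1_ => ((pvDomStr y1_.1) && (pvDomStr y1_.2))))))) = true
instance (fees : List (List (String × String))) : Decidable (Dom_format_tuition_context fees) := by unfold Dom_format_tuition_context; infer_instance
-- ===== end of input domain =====

-- B differs from A by a group-first decomposition (recursive consecutive grouping, then a nested render loop) instead of A's single loop with a mutable current_category; same return value.

-- fee.get(k, dflt) on the association list (first match), shared by both ports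
def pvFGet (fee : List (String × String)) (k dflt : String) : String :=
  (PySem.Dict.mk fee).getD k dflt

-- ===== PORT A =====
def format_tuition_context (fees : List (List (String × String))) : String :=
  if fees = [] then "" else
    let st := fees.foldl
      (fun (st : List String × Option String) fee =>
        let cat := pvFGet fee "category" "General"
        let st' := if some cat ≠ st.2 then (st.1 ++ ["\n[" ++ cat ++ "]"], some cat) else st
        (st'.1 ++ ["  " ++ pvFGet fee "item" "N/A" ++ ": " ++ pvFGet fee "value" "N/A"], st'.2))
      (["=== TUITION & FEES INFORMATION ==="], (none : Option String))
    PySem.Str.join "\n" st.1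

-- ===== PORT B =====
-- _group_consecutive from Source B: recursive grouping of consecutive fees by category
def pvGroup : List (List (String × String)) → List (String × List (List (String × String)))
  | [] => []
  | head :: rest =>
    let cat := pvFGet head "category" "General"
    match pvGroup rest with
    | (c, g) :: gs => if c = cat then (cat, head :: g) :: gs else (cat, [head]) :: (c, g) :: gs
    | [] => [(cat, [head])]

def format_tuition_context_alt (fees : List (List (String × String))) : String :=
  if fees = [] then "" else
    let parts := (pvGroup fees).foldl
      (fun ps (cg : String × List (List (String × String))) =>
        let ps := ps ++ ["\n[" ++ cg.1 ++ "]"]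
        cg.2.foldl
          (fun ps fee => ps ++ ["  " ++ pvFGet fee "item" "N/A" ++ ": " ++ pvFGet fee "value" "N/A"]) ps)
      ["=== TUITION & FEES INFORMATION ==="]
    PySem.Str.join "\n" parts

-- ===== PRECONDITION & SPEC =====
def Spec_format_tuition_context (fees : List (List (String × String))) (out : String) : Prop := out = format_tuition_context_alt fees
instance (fees : List (List (String × String))) (out : String) : Decidable (Spec_format_tuition_context fees out) := by unfold Spec_format_tuition_context; infer_instance

-- ===== CLAIM (what is proved, stated in full; the proofs are below) =====
def Claim_equal_format_tuition_context : Prop := ∀ (fees : List (List (String × String))), Dom_format_tuition_context fees → Spec_format_tuition_context fees (format_tuition_context fees)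

-- ===== LEMMAS AND PROOFS =====

def pvItem (fee : List (String × String)) : String :=
  "  " ++ pvFGet fee "item" "N/A" ++ ": " ++ pvFGet fee "value" "N/A"

def pvHdr (c : String) : String := "\n[" ++ c ++ "]"

-- the lines A's loop emits, as a recursion on the fee list carrying the current category
def pvAux : Option String → List (List (String × String)) → List String
  | _, [] => []
  | cur, fee :: rest =>
    let cat := pvFGet fee "category" "General"
    (if some cat ≠ cur then [pvHdr cat] else []) ++ pvItem fee :: pvAux (some cat) rest

-- the lines B's nested render loop emits over a group list
def pvRG : List (String × List (List (String × String))) → List String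
  | [] => []
  | (c, g) :: gs => pvHdr c :: (g.map pvItem ++ pvRG gs)

-- pvRG, but the head group's header is suppressed when its category is the current one
def pvRGCont (c : String) : List (String × List (List (String × String))) → List String
  | [] => []
  | (c', g) :: gs => if c' = c then g.map pvItem ++ pvRG gs else pvRG ((c', g) :: gs)

theorem pvFoldA (fees : List (List (String × String))) :
    ∀ (lines : List String) (cur : Option String),
      (fees.foldl
        (fun (st : List String × Option String) fee =>
          let cat := pvFGet fee "category" "General"
          let st' := if some cat ≠ st.2 then (st.1 ++ ["\n[" ++ cat ++ "]"], some cat) else st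
          (st'.1 ++ ["  " ++ pvFGet fee "item" "N/A" ++ ": " ++ pvFGet fee "value" "N/A"], st'.2))
        (lines, cur)).1 = lines ++ pvAux cur fees := by
  induction fees with
  | nil => intro lines cur; simp [pvAux]
  | cons fee rest ih =>
    intro lines cur
    simp only [List.foldl_cons]
    by_cases h : some (pvFGet fee "category" "General") ≠ cur
    · simp only [ih, pvAux, pvItem, pvHdr]
      simp [h]
    · push Not at h
      simp only [pvAux, pvItem, pvHdr]
      rw [if_neg (by simp [h]), ih]
      simp [h]

theorem pvFoldB (gs : List (String × List (List (String × String)))) :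
    ∀ (ps : List String),
      (gs.foldl
        (fun ps (cg : String × List (List (String × String))) =>
          let ps := ps ++ ["\n[" ++ cg.1 ++ "]"]
          cg.2.foldl
            (fun ps fee => ps ++ ["  " ++ pvFGet fee "item" "N/A" ++ ": " ++ pvFGet fee "value" "N/A"]) ps)
        ps) = ps ++ pvRG gs := by
  induction gs with
  | nil => intro ps; simp [pvRG]
  | cons cg gs ih =>
    intro ps
    obtain ⟨c, g⟩ := cg
    simp only [List.foldl_cons, ih, pvRG, pvHdr]
    rw [show (fun (ps : List String) (fee : List (String × String)) =>
          ps ++ ["  " ++ pvFGet fee "item" "N/A" ++ ": " ++ pvFGet fee "value" "N/A"]) =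
        (fun ps fee => ps ++ [pvItem fee]) from rfl,
        PySem.List.foldl_append_singleton_eq_map (f := pvItem) (l := g)]
    simp

theorem pvAux_some (fees : List (List (String × String))) :
    ∀ c, pvAux (some c) fees = pvRGCont c (pvGroup fees) := by
  induction fees with
  | nil => intro c; simp [pvAux, pvGroup, pvRGCont]
  | cons fee rest ih =>
    intro c
    simp only [pvAux, pvGroup]
    rw [ih]
    rcases hg : pvGroup rest with _ | ⟨⟨c', g⟩, gs⟩
    · simp only [pvRGCont]
      by_cases h : pvFGet fee "category" "General" = c
      · simp [pvRGCont, h, pvRG]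
      · simp [pvRGCont, pvRG, h]
    · by_cases h1 : c' = pvFGet fee "category" "General"
      · simp only [pvRGCont, if_pos h1]
        by_cases h : pvFGet fee "category" "General" = c
        · simp [pvRGCont, h, pvRG]
        · simp [pvRGCont, pvRG, h]
      · simp only [pvRGCont, if_neg h1]
        by_cases h : pvFGet fee "category" "General" = c
        · simp [pvRGCont, h, pvRG]
        · simp [pvRGCont, pvRG, h]

theorem pvAux_none (fees : List (List (String × String))) :
    pvAux none fees = pvRG (pvGroup fees) := by
  cases fees with
  | nil => simp [pvAux, pvGroup, pvRG]
  | cons fee rest =>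
    simp only [pvAux, pvGroup]
    rw [pvAux_some]
    rcases hg : pvGroup rest with _ | ⟨⟨c', g⟩, gs⟩
    · simp [pvRGCont, pvRG]
    · by_cases h1 : c' = pvFGet fee "category" "General"
      · simp [pvRGCont, pvRG, h1]
      · simp [pvRGCont, pvRG, h1]

-- ===== VERDICT (by name: the statement is the Claim_ definition above) =====
theorem format_tuition_context_spec : Claim_equal_format_tuition_context := by
  intro fees _
  unfold Spec_format_tuition_context format_tuition_context format_tuition_context_alt
  by_cases h : fees = []
  · simp [h]
  · simp only [if_neg h]
    rw [pvFoldA fees ["=== TUITION & FEES INFORMATION ==="] none,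
        pvFoldB (pvGroup fees) ["=== TUITION & FEES INFORMATION ==="],
        pvAux_none]
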